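-- pv_equiv track=rewrite | github.com/egijago/TUBES-DASPRO-1 | save.py | func
-- ===== SOURCE A (Python) =====
-- def func(time):
--     # Fungsi f(time)
--     # Memperbaiki format penulisan waktu (time) agar tepat 2 digit
--
--     # KAMUS LOKAL
--     # count : int
--     # let : char
--
--     # ALGORITMA
--     count = 0
--     for let in str(time):
--         count+=1
--     if count < 2 :
--         return func("0"+str(time))
--     else:
--         return str(time)
-- ===== SOURCE B (Python) =====
-- def func(time):
--     s = str(time)
--     while len(s) < 2:
--         s = "0" + s
--     return s
-- ===== Notes on version B (the rewrite author's own statement) =====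
-- stated objective: simpler
-- what changed: Replaced A's recursion with a re-stringified argument plus a manual character-count loop by a single iterative while loop that prepends '0' while len(s) < 2.
import Mathlib
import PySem

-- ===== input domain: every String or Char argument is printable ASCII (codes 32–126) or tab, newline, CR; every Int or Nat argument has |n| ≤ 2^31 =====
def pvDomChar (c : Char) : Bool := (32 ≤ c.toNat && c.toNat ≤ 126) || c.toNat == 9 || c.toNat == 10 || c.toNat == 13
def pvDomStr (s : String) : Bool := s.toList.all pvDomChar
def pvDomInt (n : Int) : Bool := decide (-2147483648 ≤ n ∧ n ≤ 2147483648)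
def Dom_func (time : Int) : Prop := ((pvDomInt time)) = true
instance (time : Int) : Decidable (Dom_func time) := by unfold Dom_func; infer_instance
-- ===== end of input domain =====

-- B replaces A's recursion (with manual character counting) by an iterative prepend loop using len(); same values everywhere.

-- ===== PORT A =====
-- A recurses on the string "0"+str(time); in the recursive call str() is the identity,
-- so the recursion is on the string itself (ported over List Char).
theorem count_foldl (init : Int) (s : List Char) :
    List.foldl (fun (c : Int) (_ : Char) => c + 1) init s = init + s.length := by
  induction s generalizing init with
  | nil => simp
  | cons a t ih => simp [List.foldl, ih]; omega

-- count = 0; for let in str(time): count += 1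
def countA (s : List Char) : Int := List.foldl (fun c _ => c + 1) 0 s

def funcStr (s : List Char) : List Char :=
  if countA s < 2 then funcStr ('0' :: s) else s
termination_by 2 - s.length
decreasing_by
  rename_i h
  rw [countA, count_foldl, Int.zero_add] at h
  simp only [List.length_cons]
  omega

def func (time : Int) : String := String.ofList (funcStr (PySem.Int.toStr time).toList)

-- ===== PORT B =====
-- the while loop: while len(s) < 2: s = "0" + s
def padLoop (s : List Char) : List Char :=
  if s.length < 2 then padLoop ('0' :: s) else s
termination_by 2 - s.length
decreasing_by simp only [List.length_cons]; omega

def func_alt (time : Int) : String := String.ofList (padLoop (PySem.Int.toStr time).toList)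

-- ===== PRECONDITION & SPEC =====
def Spec_func (time : Int) (out : String) : Prop := out = func_alt time
instance (time : Int) (out : String) : Decidable (Spec_func time out) := by unfold Spec_func; infer_instance

-- ===== CLAIM (what is proved, stated in full; the proofs are below) =====
def Claim_equal_func : Prop := ∀ (time : Int), Dom_func time → Spec_func time (func time)

-- ===== LEMMAS AND PROOFS =====
theorem funcStr_eq_padLoop (s : List Char) : funcStr s = padLoop s := by
  fun_induction funcStr s with
  | case1 s h ih =>
    rw [padLoop]
    simp only [countA, count_foldl, Int.zero_add] at *
    split_ifs with h2
    · exact ih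
    · omega
  | case2 s h =>
    rw [padLoop]
    rw [countA, count_foldl, Int.zero_add] at h
    split_ifs with h2
    · omega
    · rfl

-- ===== VERDICT (by name: the statement is the Claim_ definition above) =====
theorem func_spec : Claim_equal_func := by
  intro time _
  unfold Spec_func func func_alt
  rw [funcStr_eq_padLoop]
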